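-- pv_equiv track=rewrite | github.com/onyx-dot-app/onyx | backend/onyx/tools/tool_implementations/open_url/onyx_web_crawler.py | _expand_and_merge_regions
-- ===== SOURCE A (Python) =====
-- def _expand_and_merge_regions(
--
--     positions: list[int],
--     total_length: int,
--     context_size: int,
-- ) -> list[tuple[int, int]]:
--     """Expand match positions to include context and merge overlapping regions.
--
--     Args:
--         positions: Sorted list of match positions
--         total_length: Total length of the HTML string
--         context_size: Number of chars to include around each match
--
--     Returns:
--         List of (start, end) tuples representing non-overlapping regions
--     """
--     if not positions:
--         return []
--
--     half_context = context_size // 2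
--     regions: list[tuple[int, int]] = []
--
--     for pos in positions:
--         start = max(0, pos - half_context)
--         end = min(total_length, pos + half_context)
--         regions.append((start, end))
--
--     # Merge overlapping regions
--     merged: list[tuple[int, int]] = []
--     for start, end in sorted(regions):
--         if merged and start <= merged[-1][1]:
--             # Overlaps with previous region, extend it
--             merged[-1] = (merged[-1][0], max(merged[-1][1], end))
--         else:
--             merged.append((start, end))
--
--     return merged
-- ===== SOURCE B (Python) =====
-- def _expand_and_merge_regions(positions, total_length, context_size):
--     half = context_size // 2
--     ps = sorted(positions)
--     if not ps:
--         return []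
--     # Window ends min(total_length, p + half) are monotone in p, so merged regions are
--     # exactly the maximal runs of adjacent sorted positions whose windows touch.
--     # Mark the adjacent pairs whose windows do NOT touch as group boundaries,
--     # then build one region per group from its first and last position.
--     breaks = [(p, q) for p, q in zip(ps, ps[1:])
--               if min(total_length, p + half) < max(0, q - half)]
--     firsts = [ps[0]] + [q for _, q in breaks]
--     lasts = [p for p, _ in breaks] + [ps[-1]]
--     return [(max(0, a - half), min(total_length, b + half))
--             for a, b in zip(firsts, lasts)]
-- ===== Notes on version B (the rewrite author's own statement) =====
-- stated objective: alternative
-- what changed: Instead of A's expand-all, tuple-sort and incremental merge pass that repeatedly extends the last region, B sorts the positions, marks group boundaries declaratively (adjacent pairs whose context windows do not touch, via zip/filter), and constructs each merged region directly from the first and last position of its group, relying on window ends being monotone in the sorted position.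
import Mathlib
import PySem

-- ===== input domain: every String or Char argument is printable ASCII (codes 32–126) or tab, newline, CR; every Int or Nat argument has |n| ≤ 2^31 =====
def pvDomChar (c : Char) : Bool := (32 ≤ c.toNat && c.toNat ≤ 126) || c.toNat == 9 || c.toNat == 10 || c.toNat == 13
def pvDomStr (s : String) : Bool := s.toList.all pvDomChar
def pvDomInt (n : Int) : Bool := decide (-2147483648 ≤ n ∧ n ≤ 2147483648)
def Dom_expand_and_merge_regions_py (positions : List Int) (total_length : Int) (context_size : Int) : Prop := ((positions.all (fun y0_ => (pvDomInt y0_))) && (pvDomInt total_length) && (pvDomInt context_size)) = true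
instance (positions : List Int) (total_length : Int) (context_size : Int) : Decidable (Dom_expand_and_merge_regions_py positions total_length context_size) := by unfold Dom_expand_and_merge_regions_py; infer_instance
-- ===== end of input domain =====

-- B replaces A's incremental merge (extend the last region while scanning the sorted region tuples)
-- by a declarative grouping: sort the positions, mark adjacent pairs whose context windows do not touch
-- as group boundaries (zip/filter), and build each merged region from its group's first and last position.


-- ===== PORT A =====
-- merged-loop body: `if merged and start <= merged[-1][1]: merged[-1] = (merged[-1][0], max(merged[-1][1], end)) else: merged.append((start, end))`
-- (truthiness of `merged` and `merged[-1]` rendered via getLast?; in-place update of the last element = dropLast ++ [new])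
def pvMergeStepA (merged : List (Int × Int)) (r : Int × Int) : List (Int × Int) :=
  match merged.getLast? with
  | some last =>
      if r.1 ≤ last.2 then merged.dropLast ++ [(last.1, max last.2 r.2)]
      else merged ++ [r]
  | none => merged ++ [r]

def expand_and_merge_regions_py (positions : List Int) (total_length : Int) (context_size : Int) : List (Int × Int) :=
  if positions = [] then []
  else
    let half_context := PySem.Int.floordiv context_size 2
    -- regions loop: append (max(0,pos-half), min(total,pos+half)) for each pos
    let regions := positions.foldl
      (fun acc pos => acc ++ [(max 0 (pos - half_context), min total_length (pos + half_context))]) []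
    -- for start, end in sorted(regions): … (tuple sort = lexicographic on the two components)
    (PySem.List.sorted2 regions Prod.fst Prod.snd).foldl pvMergeStepA []

-- ===== PORT B =====
-- body of Source B for a nonempty sorted list p0 :: t (ps[1:] = t; ps[-1] = pyGet? at -1, always some on a nonempty list)
def pvBuild (total_length half : Int) (p0 : Int) (t : List Int) : List (Int × Int) :=
  let breaks := ((p0 :: t).zip t).filter
    (fun pq => decide (min total_length (pq.1 + half) < max 0 (pq.2 - half)))
  let firsts := p0 :: breaks.map Prod.snd
  let lasts := breaks.map Prod.fst ++ [(PySem.List.pyGet? (p0 :: t) (-1)).getD 0]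
  (firsts.zip lasts).map (fun ab => (max 0 (ab.1 - half), min total_length (ab.2 + half)))

def expand_and_merge_regions_py_alt (positions : List Int) (total_length : Int) (context_size : Int) : List (Int × Int) :=
  let half := PySem.Int.floordiv context_size 2
  match PySem.List.sorted positions (fun x => x) with
  | [] => []
  | p0 :: t => pvBuild total_length half p0 t

-- ===== PRECONDITION & SPEC =====
def Spec_expand_and_merge_regions_py (positions : List Int) (total_length : Int) (context_size : Int) (out : List (Int × Int)) : Prop := out = expand_and_merge_regions_py_alt positions total_length context_size
instance (positions : List Int) (total_length : Int) (context_size : Int) (out : List (Int × Int)) : Decidable (Spec_expand_and_merge_regions_py positions total_length context_size out) := by unfold Spec_expand_and_merge_regions_py; infer_instance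

-- ===== CLAIM (what is proved, stated in full; the proofs are below) =====
def Claim_equal_expand_and_merge_regions_py : Prop := ∀ (positions : List Int) (total_length : Int) (context_size : Int), Dom_expand_and_merge_regions_py positions total_length context_size → Spec_expand_and_merge_regions_py positions total_length context_size (expand_and_merge_regions_py positions total_length context_size)

-- ===== LEMMAS AND PROOFS =====

-- the lexicographic ≤ on Int pairs (Python's tuple order)
def pvLexLe (a b : Int × Int) : Prop := a.1 < b.1 ∨ (a.1 = b.1 ∧ a.2 ≤ b.2)

-- the strict Bool comparison sorted2 uses for keys (fst, snd)
def pvLtB (a b : Int × Int) : Bool :=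
  decide (a.1 < b.1) || (!decide (b.1 < a.1) && decide (a.2 < b.2))

lemma pvLexLe_iff_not_ltB (a b : Int × Int) : pvLexLe a b ↔ pvLtB b a = false := by
  simp [pvLexLe, pvLtB]; omega

lemma pvInsertBy_pairwise (x : Int × Int) (acc : List (Int × Int))
    (h : acc.Pairwise pvLexLe) : (PySem.List.insertBy pvLtB x acc).Pairwise pvLexLe := by
  induction acc with
  | nil => simp [PySem.List.insertBy]
  | cons y ys ih =>
    rcases List.pairwise_cons.mp h with ⟨hy, hys⟩
    by_cases hxy : pvLtB x y = true
    · simp only [PySem.List.insertBy, hxy]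
      refine List.pairwise_cons.mpr ⟨?_, h⟩
      intro z hz
      rcases List.mem_cons.mp hz with rfl | hz
      · rw [pvLexLe_iff_not_ltB]
        simp [pvLtB] at hxy ⊢
        omega
      · have hyz := hy z hz
        rw [pvLexLe_iff_not_ltB] at hyz ⊢
        simp [pvLtB] at hxy hyz ⊢
        omega
    · have hxy' : pvLtB x y = false := by simpa using hxy
      simp only [PySem.List.insertBy, hxy']
      simp only [Bool.false_eq_true, if_false]
      refine List.pairwise_cons.mpr ⟨?_, ih hys⟩
      intro z hz
      rw [PySem.List.mem_insertBy] at hz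
      rcases hz with rfl | hz
      · rw [pvLexLe_iff_not_ltB]; exact hxy'
      · exact hy z hz

lemma pvFoldl_insertBy_pairwise (xs acc : List (Int × Int)) (h : acc.Pairwise pvLexLe) :
    (xs.foldl (fun acc x => PySem.List.insertBy pvLtB x acc) acc).Pairwise pvLexLe := by
  induction xs generalizing acc with
  | nil => simpa using h
  | cons x t ih => exact ih _ (pvInsertBy_pairwise x acc h)

lemma pvSorted2_pairwise (xs : List (Int × Int)) :
    (PySem.List.sorted2 xs Prod.fst Prod.snd).Pairwise pvLexLe := by
  have : PySem.List.sorted2 xs Prod.fst Prod.snd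
      = xs.foldl (fun acc x => PySem.List.insertBy pvLtB x acc) [] := rfl
  rw [this]
  exact pvFoldl_insertBy_pairwise xs [] (by simp)

-- the region map, monotone in pos
def pvF (total_length half_context : Int) (pos : Int) : Int × Int :=
  (max 0 (pos - half_context), min total_length (pos + half_context))

lemma pvF_mono (L h p q : Int) (hpq : p ≤ q) : pvLexLe (pvF L h p) (pvF L h q) := by
  simp [pvF, pvLexLe]; omega

-- sorting the mapped regions = mapping the sorted positions
lemma pvSorted2_map (L h : Int) (positions : List Int) :
    PySem.List.sorted2 (positions.map (pvF L h)) Prod.fst Prod.snd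
      = (PySem.List.sorted positions (fun x => x)).map (pvF L h) := by
  have hperm : (PySem.List.sorted2 (positions.map (pvF L h)) Prod.fst Prod.snd).Perm
      ((PySem.List.sorted positions (fun x => x)).map (pvF L h)) := by
    exact (PySem.List.sorted2_perm _ _ _ _).trans
      ((PySem.List.sorted_perm positions (fun x => x) false).map (pvF L h)).symm
  have h1 : (PySem.List.sorted2 (positions.map (pvF L h)) Prod.fst Prod.snd).Pairwise pvLexLe :=
    pvSorted2_pairwise _
  have h2 : ((PySem.List.sorted positions (fun x => x)).map (pvF L h)).Pairwise pvLexLe := by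
    refine List.Pairwise.map _ ?_ (PySem.List.sorted_pairwise positions (fun x => x))
    intro a b hab
    exact pvF_mono L h a b hab
  have hanti : ∀ (a b : Int × Int), pvLexLe a b → pvLexLe b a → a = b := by
    intro a b hab hba
    rcases a with ⟨a1, a2⟩; rcases b with ⟨b1, b2⟩
    simp [pvLexLe] at hab hba
    have : a1 = b1 ∧ a2 = b2 := by omega
    simp [this.1, this.2]
  exact List.Perm.eq_of_pairwise (fun a b _ _ => hanti a b) h1 h2 hperm

-- A's region-building loop is map
lemma pvRegions_eq_map (L h : Int) (positions : List Int) :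
    positions.foldl (fun acc pos => acc ++ [(max 0 (pos - h), min L (pos + h))]) []
      = positions.map (pvF L h) := by
  suffices hgen : ∀ acc, positions.foldl (fun acc pos => acc ++ [(max 0 (pos - h), min L (pos + h))]) acc
      = acc ++ positions.map (pvF L h) by simpa using hgen []
  induction positions with
  | nil => simp
  | cons p t ih => intro acc; simp [List.foldl_cons, ih, pvF]

-- recursive characterisation of A's merge loop: current region c, remaining sorted positions
def pvMergeRec (L h : Int) : Int × Int → List Int → List (Int × Int)
  | c, [] => [c]
  | c, q :: t =>
      if max 0 (q - h) ≤ c.2 then pvMergeRec L h (c.1, max c.2 (min L (q + h))) t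
      else c :: pvMergeRec L h (pvF L h q) t

lemma pvFold_mergeRec (L h : Int) : ∀ (t : List Int) (out : List (Int × Int)) (c : Int × Int),
    (t.map (pvF L h)).foldl pvMergeStepA (out ++ [c]) = out ++ pvMergeRec L h c t := by
  intro t
  induction t with
  | nil => intro out c; simp [pvMergeRec]
  | cons q t ih =>
    intro out c
    simp only [List.map_cons, List.foldl_cons, pvMergeRec]
    by_cases hle : max 0 (q - h) ≤ c.2
    · have hA : pvMergeStepA (out ++ [c]) (pvF L h q)
          = out ++ [(c.1, max c.2 (min L (q + h)))] := by
        simp [pvMergeStepA, pvF, hle]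
      rw [hA, if_pos hle, ih out _]
    · have hA : pvMergeStepA (out ++ [c]) (pvF L h q) = (out ++ [c]) ++ [pvF L h q] := by
        simp [pvMergeStepA, pvF, hle]
      rw [hA, if_neg hle, ih (out ++ [c]) _]
      simp

-- group-boundary recursion: a is the pending group's clamped start, p the previous position
def pvGroups (L h : Int) : Int → Int → List Int → List (Int × Int)
  | a, p, [] => [(a, min L (p + h))]
  | a, p, q :: t =>
      if min L (p + h) < max 0 (q - h)
      then (a, min L (p + h)) :: pvGroups L h (max 0 (q - h)) q t
      else pvGroups L h a q t

-- on a sorted tail, A's merge recursion is exactly the group recursion (window ends are monotone)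
lemma pvMergeRec_groups (L h : Int) : ∀ (t : List Int) (p a : Int),
    List.IsChain (· ≤ ·) (p :: t) →
    pvMergeRec L h (a, min L (p + h)) t = pvGroups L h a p t := by
  intro t
  induction t with
  | nil => intro p a _; simp [pvMergeRec, pvGroups]
  | cons q t ih =>
    intro p a hch
    rcases List.isChain_cons_cons.mp hch with ⟨hpq, hch'⟩
    simp only [pvMergeRec, pvGroups]
    by_cases hbrk : min L (p + h) < max 0 (q - h)
    · rw [if_neg (by omega), if_pos hbrk]
      have : pvF L h q = (max 0 (q - h), min L (q + h)) := rfl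
      rw [this, ih q (max 0 (q - h)) hch']
    · rw [if_pos (by omega), if_neg hbrk]
      have hmax : max (min L (p + h)) (min L (q + h)) = min L (q + h) := by omega
      rw [hmax, ih q a hch']

-- the first component of the pending group only shows up in the head tuple
lemma pvGroups_exists (L h : Int) : ∀ (t : List Int) (p : Int),
    ∃ e r, ∀ a, pvGroups L h a p t = (a, e) :: r := by
  intro t
  induction t with
  | nil => intro p; exact ⟨min L (p + h), [], fun a => rfl⟩
  | cons q t ih =>
    intro p
    by_cases hbrk : min L (p + h) < max 0 (q - h)
    · exact ⟨min L (p + h), pvGroups L h (max 0 (q - h)) q t,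
        fun a => by simp [pvGroups, hbrk]⟩
    · obtain ⟨e, r, hall⟩ := ih q
      exact ⟨e, r, fun a => by simp [pvGroups, hbrk, hall a]⟩

-- B's zip/filter construction computes the group recursion
lemma pvBuild_groups (L h : Int) : ∀ (t : List Int) (p : Int),
    pvBuild L h p t = pvGroups L h (max 0 (p - h)) p t := by
  intro t
  induction t with
  | nil => intro p; simp [pvBuild, pvGroups, PySem.List.pyGet?_neg_one]
  | cons q t ih =>
    intro p
    by_cases hbrk : min L (p + h) < max 0 (q - h)
    · have hrec : pvBuild L h p (q :: t) =
          (max 0 (p - h), min L (p + h)) :: pvBuild L h q t := by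
        simp only [pvBuild, List.zip_cons_cons, List.filter_cons, decide_eq_true_eq,
          if_pos hbrk, List.map_cons, PySem.List.pyGet?_neg_one, List.getLast?_cons_cons,
          List.cons_append]
      rw [hrec, ih q]
      simp [pvGroups, hbrk]
    · obtain ⟨e, r, hall⟩ := pvGroups_exists L h t q
      have hgl : ∃ y gl', (List.map Prod.fst (((q :: t).zip t).filter
          (fun pq => decide (min L (pq.1 + h) < max 0 (pq.2 - h))))
            ++ [(PySem.List.pyGet? (q :: t) (-1)).getD 0]) = y :: gl' := by
        cases hF : (((q :: t).zip t).filter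
            (fun pq => decide (min L (pq.1 + h) < max 0 (pq.2 - h)))) with
        | nil => exact ⟨(PySem.List.pyGet? (q :: t) (-1)).getD 0, [], by simp⟩
        | cons z zs =>
            exact ⟨z.1, List.map Prod.fst zs ++ [(PySem.List.pyGet? (q :: t) (-1)).getD 0],
              by simp⟩
      obtain ⟨y, gl', hy⟩ := hgl
      have hq : pvBuild L h q t = (max 0 (q - h), min L (y + h)) ::
          List.map (fun ab => (max 0 (ab.1 - h), min L (ab.2 + h)))
            ((List.map Prod.snd (((q :: t).zip t).filter
              (fun pq => decide (min L (pq.1 + h) < max 0 (pq.2 - h))))).zip gl') := by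
        simp only [pvBuild, hy, List.zip_cons_cons, List.map_cons]
      have hp : pvBuild L h p (q :: t) = (max 0 (p - h), min L (y + h)) ::
          List.map (fun ab => (max 0 (ab.1 - h), min L (ab.2 + h)))
            ((List.map Prod.snd (((q :: t).zip t).filter
              (fun pq => decide (min L (pq.1 + h) < max 0 (pq.2 - h))))).zip gl') := by
        simp only [pvBuild, List.zip_cons_cons, List.filter_cons, decide_eq_true_eq, hbrk,
          if_false, PySem.List.pyGet?_neg_one, List.getLast?_cons_cons]
        rw [show ((q :: t).getLast?.getD 0) = (PySem.List.pyGet? (q :: t) (-1)).getD 0 by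
          rw [PySem.List.pyGet?_neg_one]]
        simp only [hy, List.zip_cons_cons, List.map_cons]
      have hqg : pvGroups L h (max 0 (q - h)) q t = (max 0 (q - h), e) :: r := hall _
      have hq' := ih q
      rw [hqg, hq] at hq'
      have hpair := List.cons.injEq _ _ _ _ ▸ hq'
      have he : min L (y + h) = e := (Prod.mk.injEq _ _ _ _ ▸ hpair.1).2
      have hr := hpair.2
      simp only [pvGroups, if_neg hbrk, hall (max 0 (p - h))]
      rw [hp, he, hr]

-- ===== VERDICT (by name: the statement is the Claim_ definition above) =====
theorem expand_and_merge_regions_py_spec : Claim_equal_expand_and_merge_regions_py := by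
  intro positions total_length context_size _
  unfold Spec_expand_and_merge_regions_py
  unfold expand_and_merge_regions_py expand_and_merge_regions_py_alt
  set h := PySem.Int.floordiv context_size 2 with hh
  by_cases hnil : positions = []
  · subst hnil
    simp [PySem.List.sorted]
  · simp only [if_neg hnil]
    rw [pvRegions_eq_map total_length h positions, pvSorted2_map total_length h positions]
    rcases hs : PySem.List.sorted positions (fun x => x) with _ | ⟨p, t⟩
    · exact absurd ((PySem.List.sorted_eq_nil_iff positions (fun x => x) false).mp hs) hnil
    · have hch : List.IsChain (· ≤ ·) (p :: t) := by
        rw [← hs]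
        exact List.isChain_iff_pairwise.mpr
          (by simpa using PySem.List.sorted_pairwise positions (fun x => x))
      simp only [List.map_cons, List.foldl_cons]
      have hA0 : pvMergeStepA [] (pvF total_length h p) = [] ++ [pvF total_length h p] := by
        simp [pvMergeStepA]
      rw [hA0, pvFold_mergeRec total_length h t [] (pvF total_length h p)]
      have : pvF total_length h p = (max 0 (p - h), min total_length (p + h)) := rfl
      rw [this]
      simp only [List.nil_append]
      rw [pvMergeRec_groups total_length h t p (max 0 (p - h)) hch,
        ← pvBuild_groups total_length h t p]
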